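-- pv_equiv track=rewrite | github.com/rabbit-6969/obd-agent-elm327 | elm327_diagnostic/vin_reader.py | validate_vin
-- ===== SOURCE A (Python) =====
-- def validate_vin(vin: str) -> bool:
--     """
--     Validate VIN format
--
--     Args:
--         vin: VIN to validate
--
--     Returns:
--         True if valid format, False otherwise
--     """
--     if not vin or len(vin) != 17:
--         return False
--
--     if not vin.isalnum():
--         return False
--
--     # Check for invalid characters (I, O, Q not allowed in VIN)
--     invalid_chars = ['I', 'O', 'Q']
--     if any(char in vin for char in invalid_chars):
--         return False
--
--     return True
-- ===== SOURCE B (Python) =====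
-- # Whitelist approach: a VIN is valid iff it is 17 chars and its character set
-- # is a subset of the precomputed allowed alphabet (ASCII alphanumerics minus I, O, Q).
-- _VIN_CHARS = frozenset("0123456789abcdefghijklmnopqrstuvwxyzABCDEFGHJKLMNPRSTUVWXYZ")
--
-- def validate_vin(vin: str) -> bool:
--     return len(vin) == 17 and not (set(vin) - _VIN_CHARS)
-- ===== Notes on version B (the rewrite author's own statement) =====
-- stated objective: simpler
-- what changed: Replaces A's staged predicate scans (whole-string isalnum, then a substring search for each of I/O/Q) with set algebra against a precomputed whitelist alphabet: valid iff length is 17 and set(vin) - ALLOWED is empty; within the printable-ASCII domain the whitelist equals isalnum-minus-IOQ.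
import Mathlib
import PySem

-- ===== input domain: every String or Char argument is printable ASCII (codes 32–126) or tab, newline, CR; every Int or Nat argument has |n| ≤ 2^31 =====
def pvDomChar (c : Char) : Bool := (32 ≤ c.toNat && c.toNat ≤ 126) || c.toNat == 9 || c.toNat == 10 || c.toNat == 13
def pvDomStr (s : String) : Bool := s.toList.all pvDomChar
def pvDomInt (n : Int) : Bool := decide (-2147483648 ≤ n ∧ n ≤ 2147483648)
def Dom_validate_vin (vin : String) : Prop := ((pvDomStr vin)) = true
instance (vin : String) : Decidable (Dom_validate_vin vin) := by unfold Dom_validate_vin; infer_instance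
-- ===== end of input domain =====

-- B replaces A's staged predicate scans by set algebra against a precomputed whitelist alphabet (objective: simpler).
-- ===== PORT A =====
def validate_vin (vin : String) : Bool :=
  if vin == "" || PySem.Str.len vin ≠ 17 then false
  else if !PySem.Str.strIsalnum vin then false
  else if (['I', 'O', 'Q'].any fun ch => PySem.Str.isIn (String.ofList [ch]) vin) then false
  else true

-- ===== PORT B =====
-- the module-level frozenset constant _VIN_CHARS
def vinChars : PySem.Set Char :=
  PySem.Set.ofList "0123456789abcdefghijklmnopqrstuvwxyzABCDEFGHJKLMNPRSTUVWXYZ".toList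

def validate_vin_alt (vin : String) : Bool :=
  decide (PySem.Str.len vin = 17) &&
    (PySem.Set.diff (PySem.Set.ofList vin.toList) vinChars).isEmpty

-- ===== PRECONDITION & SPEC =====
def Spec_validate_vin (vin : String) (out : Bool) : Prop := out = validate_vin_alt vin
instance (vin : String) (out : Bool) : Decidable (Spec_validate_vin vin out) := by unfold Spec_validate_vin; infer_instance

-- ===== CLAIM (what is proved, stated in full; the proofs are below) =====
def Claim_equal_validate_vin : Prop := ∀ (vin : String), Dom_validate_vin vin → Spec_validate_vin vin (validate_vin vin)

-- ===== LEMMAS AND PROOFS =====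

theorem isIn_singleton (c : Char) (l : List Char) :
    PySem.Chars.isIn [c] l = l.contains c := by
  rw [Bool.eq_iff_iff]
  simp only [PySem.Chars.isIn_iff_infix, List.contains_iff_mem]
  constructor
  · intro h; exact List.singleton_sublist.mp h.sublist
  · intro h
    obtain ⟨l1, l2, rfl⟩ := List.append_of_mem h
    exact ⟨l1, l2, by simp⟩

theorem tolist_ne (s : String) (h : s ≠ "") : s.toList ≠ [] := by
  intro hn; apply h
  have := congrArg String.ofList hn
  simpa using this

-- per-character equivalence of A's conditions with whitelist membership, over Nat codes < 127
set_option maxRecDepth 4000 in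
theorem percharNat : ∀ n, n < 127 →
    ((PySem.Chars.isalnum (Char.ofNat n) = true ∧ Char.ofNat n ≠ 'I' ∧
      Char.ofNat n ≠ 'O' ∧ Char.ofNat n ≠ 'Q') ↔ Char.ofNat n ∈ vinChars) := by
  decide

theorem perchar (c : Char) (h : pvDomChar c = true) :
    ((PySem.Chars.isalnum c = true ∧ c ≠ 'I' ∧ c ≠ 'O' ∧ c ≠ 'Q') ↔ c ∈ vinChars) := by
  have hlt : c.toNat < 127 := by
    simp [pvDomChar] at h
    omega
  have := percharNat c.toNat hlt
  rwa [Char.ofNat_toNat] at this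

-- ===== VERDICT (by name: the statement is the Claim_ definition above) =====
theorem validate_vin_spec : Claim_equal_validate_vin := by
  intro vin hdom
  have hdom' : ∀ c ∈ vin.toList, pvDomChar c = true := by
    simpa [Dom_validate_vin, pvDomStr, List.all_eq_true] using hdom
  unfold Spec_validate_vin validate_vin validate_vin_alt
  by_cases hlen : ((vin.length : Int) = 17)
  · have hne : vin ≠ "" := by intro h; subst h; simp at hlen
    have hnil := tolist_ne vin hne
    rw [Bool.eq_iff_iff]
    simp [PySem.Str.len, hlen, hne, hnil, PySem.Chars.strIsalnum, isIn_singleton,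
      PySem.Set.diff, List.isEmpty_iff, List.filter_eq_nil_iff, PySem.Set.mem_ofList]
    constructor
    · rintro ⟨h1, hI, hO, hQ⟩ x hx
      exact (perchar x (hdom' x hx)).mp
        ⟨h1 x hx, fun h => hI (h ▸ hx), fun h => hO (h ▸ hx), fun h => hQ (h ▸ hx)⟩
    · intro h
      refine ⟨fun x hx => ((perchar x (hdom' x hx)).mpr (h x hx)).1,
        fun hx => ?_, fun hx => ?_, fun hx => ?_⟩
      · exact ((perchar _ (hdom' _ hx)).mpr (h _ hx)).2.1 rfl
      · exact ((perchar _ (hdom' _ hx)).mpr (h _ hx)).2.2.1 rfl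
      · exact ((perchar _ (hdom' _ hx)).mpr (h _ hx)).2.2.2 rfl
  · rw [Bool.eq_iff_iff]
    simp [PySem.Str.len, hlen]
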